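-- pv_equiv track=rewrite | github.com/Kawser-nerd/CLCDSA | Source Codes/AtCoder/agc009/B/1193398.py | dfs
-- ===== SOURCE A (Python) =====
-- def dfs(N, Adj, v, p):
--     dl = []
--
--     for u in Adj[v]:
--         if u == p:
--             continue
--
--         dl.append(dfs(N, Adj, u, v))
--
--     dl.sort(reverse=True)
--
--     if not dl:
--         return 0
--
--     res = max(dl[i] + i + 1 for i in range(len(dl)))
--
--     return res
-- ===== SOURCE B (Python) =====
-- def dfs(N, Adj, v, p):
--     dl = [dfs(N, Adj, u, v) for u in Adj[v] if u != p]
--     return max((x + sum(1 for y in dl if y >= x) for x in dl), default=0)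
-- ===== Notes on version B (the rewrite author's own statement) =====
-- stated objective: alternative
-- what changed: B drops A's sort-then-positional-scan combine (sort children's values descending, max of dl[i]+i+1) and its mutating append loop: it builds the child list by a comprehension and takes max(x + #{y >= x}) over the unsorted list with default 0, so no sorting, no in-place mutation and no empty-case branch.
import Mathlib
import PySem

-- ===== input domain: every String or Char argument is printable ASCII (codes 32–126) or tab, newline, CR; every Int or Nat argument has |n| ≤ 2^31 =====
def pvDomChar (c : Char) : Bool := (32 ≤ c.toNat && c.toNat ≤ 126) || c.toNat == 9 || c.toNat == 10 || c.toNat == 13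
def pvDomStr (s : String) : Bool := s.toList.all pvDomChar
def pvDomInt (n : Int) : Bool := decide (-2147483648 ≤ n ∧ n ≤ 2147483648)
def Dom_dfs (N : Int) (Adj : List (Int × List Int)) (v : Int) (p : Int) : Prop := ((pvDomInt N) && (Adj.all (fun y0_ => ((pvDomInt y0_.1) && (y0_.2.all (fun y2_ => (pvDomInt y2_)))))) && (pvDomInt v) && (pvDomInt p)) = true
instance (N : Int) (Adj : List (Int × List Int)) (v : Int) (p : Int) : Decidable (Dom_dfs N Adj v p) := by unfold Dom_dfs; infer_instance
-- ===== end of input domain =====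

-- B replaces A's sort-then-positional-scan aggregation (sort descending, max of dl[i]+i+1)
-- and append loop by a comprehension plus an unsorted counting maximum max(x + #{y ≥ x}, default 0);
-- equal cost class, no sorting.  Equivalence is claimed on Pre_ (inputs where Python A returns).

-- ===== PORT A =====
-- fuel bound for the Lean recursion (a totality guard only: large enough for every input
-- admitted by Pre_, where the parent-avoiding walk is acyclic, so depth ≤ #states)
def pvFuel (Adj : List (Int × List Int)) : Nat := (Adj.length + 1) * (Adj.length + 1) + 1

-- dict lookup on the association list (first match), shared by both ports and Pre_
def pvLook (Adj : List (Int × List Int)) (v : Int) : Option (List Int) :=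
  (Adj.find? (fun kv => kv.1 == v)).map (fun kv => kv.2)

mutual
-- literal port of A; `Adj[v]` is dict lookup (none = KeyError, excluded by Pre_);
-- fuel exhaustion (unreachable under Pre_) returns 0
def dfsA (fuel : Nat) (N : Int) (Adj : List (Int × List Int)) (v : Int) (p : Int) : Int :=
  match fuel with
  | 0 => 0
  | f + 1 =>
    match pvLook Adj v with
    | none => 0
    | some ns =>
      let dl := dfsAKids f N Adj ns v p []
      let dl := PySem.List.sorted dl (fun x => x) true
      if dl = [] then 0
      else
        -- max(dl[i] + i + 1 for i in range(len(dl))): indices are in range and the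
        -- range is nonempty here, so pyGetD's default and max?'s getD are unreachable
        (PySem.List.max? ((PySem.List.pyRange 0 (dl.length : Int) 1).map
            (fun i => PySem.List.pyGetD dl i 0 + i + 1)) (fun x => x)).getD 0
termination_by (fuel, 0)
-- A's append loop over Adj[v] with `continue`, as an accumulator recursion
def dfsAKids (fuel : Nat) (N : Int) (Adj : List (Int × List Int)) (ns : List Int)
    (v : Int) (p : Int) (acc : List Int) : List Int :=
  match ns with
  | [] => acc
  | u :: t =>
    if u == p then dfsAKids fuel N Adj t v p acc
    else dfsAKids fuel N Adj t v p (acc ++ [dfsA fuel N Adj u v])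
termination_by (fuel, ns.length + 1)
end

def dfs (N : Int) (Adj : List (Int × List Int)) (v : Int) (p : Int) : Int :=
  dfsA (pvFuel Adj) N Adj v p

-- ===== PORT B =====
-- literal port of B: the child list is a comprehension (filter + map, no accumulator
-- helper), and the result is max over the unsorted list of x + sum(1 for y in dl if y >= x),
-- with Python's `default=0` as getD 0
def dfsB (fuel : Nat) (N : Int) (Adj : List (Int × List Int)) (v : Int) (p : Int) : Int :=
  match fuel with
  | 0 => 0
  | f + 1 =>
    match pvLook Adj v with
    | none => 0
    | some ns =>
      let dl := (ns.filter (fun u => u != p)).map (fun u => dfsB f N Adj u v)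
      (PySem.List.max?
        (dl.map (fun x => x + dl.foldl (fun c y => if x ≤ y then c + 1 else c) 0))
        (fun x => x)).getD 0

def dfs_alt (N : Int) (Adj : List (Int × List Int)) (v : Int) (p : Int) : Int :=
  dfsB (pvFuel Adj) N Adj v p

-- ===== PRECONDITION & SPEC =====
-- Pre_dfs = exactly the inputs on which Python A returns: every node the parent-avoiding
-- walk from (v, p) can reach has an adjacency entry (else KeyError), and no reachable
-- state of that walk lies on a cycle (else the recursion never returns).  "Reachable" is
-- plain graph reachability of the INPUT graph's step relation (a saturating closure over
-- at most #states steps); it decides a shape property of the input — which lookups the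
-- walk can hit and whether the walk graph is acyclic — and computes no value of either
-- port.  No non-search closed form of "the recursion terminates" exists for a dict graph.
def pvStep (Adj : List (Int × List Int)) (S : List (Int × Int)) : List (Int × Int) :=
  S.foldl (fun acc s =>
    match pvLook Adj s.1 with
    | none => acc
    | some ns => ns.foldl (fun acc u =>
        if u = s.2 then acc else if (u, s.1) ∈ acc then acc else acc ++ [(u, s.1)]) acc) S

def pvIter (Adj : List (Int × List Int)) (n : Nat) (S : List (Int × Int)) : List (Int × Int) :=
  match n with
  | 0 => S
  | k + 1 => pvIter Adj k (pvStep Adj S)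

def pvSuccs (Adj : List (Int × List Int)) (s : Int × Int) : List (Int × Int) :=
  match pvLook Adj s.1 with
  | none => []
  | some ns => (ns.filter (fun u => u ≠ s.2)).map (fun u => (u, s.1))

def pvReach (Adj : List (Int × List Int)) (v : Int) (p : Int) : List (Int × Int) :=
  pvIter Adj (pvFuel Adj) [(v, p)]

def Pre_dfs (N : Int) (Adj : List (Int × List Int)) (v : Int) (p : Int) : Prop :=
  (∀ s ∈ pvReach Adj v p, (pvLook Adj s.1).isSome = true) ∧
  (∀ s ∈ pvReach Adj v p, s ∉ pvIter Adj (pvFuel Adj) (pvSuccs Adj s))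
instance (N : Int) (Adj : List (Int × List Int)) (v : Int) (p : Int) : Decidable (Pre_dfs N Adj v p) := by
  unfold Pre_dfs; infer_instance

def pvWitness_dfs : Int × (List (Int × List Int)) × Int × Int :=
  (3, [(0, [1, 2]), (1, [0]), (2, [0])], 0, -1)

def Spec_dfs (N : Int) (Adj : List (Int × List Int)) (v : Int) (p : Int) (out : Int) : Prop := out = dfs_alt N Adj v p
instance (N : Int) (Adj : List (Int × List Int)) (v : Int) (p : Int) (out : Int) : Decidable (Spec_dfs N Adj v p out) := by unfold Spec_dfs; infer_instance

-- ===== CLAIM (what is proved, stated in full; the proofs are below) =====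
def Claim_equal_dfs : Prop := ∀ (N : Int) (Adj : List (Int × List Int)) (v : Int) (p : Int), Dom_dfs N Adj v p → Pre_dfs N Adj v p → Spec_dfs N Adj v p (dfs N Adj v p)

-- ===== LEMMAS AND PROOFS =====

-- the inner counting fold of B is a countP
theorem pvFoldlCount (dl : List Int) (x : Int) (c0 : Int) :
    dl.foldl (fun c y => if x ≤ y then c + 1 else c) c0
      = c0 + (dl.countP (fun y => x ≤ y) : Int) := by
  induction dl generalizing c0 with
  | nil => simp
  | cons y t ih =>
    simp only [List.foldl_cons, List.countP_cons, ih]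
    by_cases h : x ≤ y
    · simp [h]; ring
    · simp [h]

-- sorted-descending positional bound: position k has at least k+1 elements ≥ it
theorem pvCntGe (dl : List Int) (k : Nat)
    (hk : k < (PySem.List.sorted dl (fun x => x) true).length) :
    k + 1 ≤ dl.countP (fun y => (PySem.List.sorted dl (fun x => x) true)[k] ≤ y) := by
  set s := PySem.List.sorted dl (fun x => x) true with hs
  have hperm : s.Perm dl := PySem.List.sorted_perm dl (fun x => x) true
  have hpw : s.Pairwise (fun a b => b ≤ a) := PySem.List.sorted_pairwise_rev dl (fun x => x)
  calc k + 1 = (s.take (k + 1)).length := by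
        rw [List.length_take]; omega
    _ = (s.take (k + 1)).countP (fun y => s[k] ≤ y) := by
        symm
        rw [List.countP_eq_length]
        intro a ha
        obtain ⟨j, hj, rfl⟩ := List.getElem_of_mem ha
        rw [List.getElem_take]
        have hjk : j < k + 1 := by
          have := hj; rw [List.length_take] at this; omega
        rcases Nat.lt_or_ge j k with hjk' | hjk'
        · simpa using (List.pairwise_iff_getElem.mp hpw) j k (by omega) hk hjk'
        · have : j = k := by omega
          subst this; simp
    _ ≤ (s.take (k + 1)).countP (fun y => s[k] ≤ y)
          + (s.drop (k + 1)).countP (fun y => s[k] ≤ y) := by omega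
    _ = s.countP (fun y => s[k] ≤ y) := by
        rw [← List.countP_append, List.take_append_drop]
    _ = dl.countP (fun y => s[k] ≤ y) := hperm.countP_eq _

-- counting bound back to a position: the element at index (count-1) is still ≥ x
theorem pvPosOfCnt (dl : List Int) (x : Int) (hx : x ∈ dl) :
    0 < dl.countP (fun y => x ≤ y) ∧
    dl.countP (fun y => x ≤ y) ≤ (PySem.List.sorted dl (fun x => x) true).length ∧
    ∀ h : dl.countP (fun y => x ≤ y) - 1 < (PySem.List.sorted dl (fun x => x) true).length,
      x ≤ (PySem.List.sorted dl (fun x => x) true)[dl.countP (fun y => x ≤ y) - 1] := by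
  set s := PySem.List.sorted dl (fun x => x) true with hs
  have hperm : s.Perm dl := PySem.List.sorted_perm dl (fun x => x) true
  have hpw : s.Pairwise (fun a b => b ≤ a) := PySem.List.sorted_pairwise_rev dl (fun x => x)
  have hlen : s.length = dl.length := hperm.length_eq
  have hcnt : dl.countP (fun y => x ≤ y) = s.countP (fun y => x ≤ y) := (hperm.countP_eq _).symm
  have hc1 : 0 < dl.countP (fun y => x ≤ y) := by
    rw [List.countP_pos_iff]; exact ⟨x, hx, by simp⟩
  have hcn : dl.countP (fun y => x ≤ y) ≤ s.length := by
    rw [hlen]; exact List.countP_le_length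
  refine ⟨hc1, hcn, ?_⟩
  intro h
  set c := dl.countP (fun y => x ≤ y) with hcdef
  by_contra hlt
  rw [not_le] at hlt
  have hlt2 : s[c - 1] < x := hlt
  have hdropzero : (s.drop (c - 1)).countP (fun y => x ≤ y) = 0 := by
    rw [List.countP_eq_zero]
    intro a ha
    obtain ⟨j, hj, rfl⟩ := List.getElem_of_mem ha
    have hjlen : c - 1 + j < s.length := by
      rw [List.length_drop] at hj; omega
    rw [List.getElem_drop]
    simp only [decide_eq_true_eq]
    rcases Nat.eq_zero_or_pos j with rfl | hj0
    · simpa using hlt2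
    · have hle : s[c - 1 + j] ≤ s[c - 1] := by
        simpa using (List.pairwise_iff_getElem.mp hpw) (c - 1) (c - 1 + j)
          h hjlen (by omega)
      omega
  have htake : (s.take (c - 1)).countP (fun y => x ≤ y) ≤ c - 1 :=
    le_trans List.countP_le_length (by rw [List.length_take]; omega)
  have hsum : s.countP (fun y => x ≤ y) ≤ c - 1 := by
    have hspl : s.take (c - 1) ++ s.drop (c - 1) = s := List.take_append_drop _ _
    calc s.countP (fun y => x ≤ y)
        = (s.take (c - 1)).countP (fun y => x ≤ y)
          + (s.drop (c - 1)).countP (fun y => x ≤ y) := by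
          rw [← List.countP_append, hspl]
      _ ≤ c - 1 := by omega
  omega

-- membership in the candidate list A builds from range(len(dl))
theorem pvMemL (s : List Int) (y : Int) :
    y ∈ (PySem.List.pyRange 0 (s.length : Int) 1).map
        (fun i => PySem.List.pyGetD s i 0 + i + 1) ↔
      ∃ k : Nat, ∃ h : k < s.length, y = s[k] + k + 1 := by
  rw [List.mem_map]
  constructor
  · rintro ⟨i, hi, rfl⟩
    rw [PySem.List.mem_pyRange_one] at hi
    obtain ⟨h0, hn⟩ := hi
    refine ⟨i.toNat, by omega, ?_⟩
    rw [PySem.List.pyGetD_eq_getElem s 0 h0 (by omega)]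
    omega
  · rintro ⟨k, hk, rfl⟩
    refine ⟨(k : Int), ?_, ?_⟩
    · rw [PySem.List.mem_pyRange_one]; omega
    · rw [PySem.List.pyGetD_eq_getElem s 0 (by omega) (by simpa using hk)]
      simp

-- the combine step: A's sort + max(dl[i]+i+1) equals B's max of counting candidates,
-- for nonnegative inputs
theorem pvCombine (dl : List Int) (h0 : ∀ x ∈ dl, 0 ≤ x) :
    (if PySem.List.sorted dl (fun x => x) true = [] then 0
     else (PySem.List.max? (((PySem.List.pyRange 0
         ((PySem.List.sorted dl (fun x => x) true).length : Int) 1)).map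
         (fun i => PySem.List.pyGetD (PySem.List.sorted dl (fun x => x) true) i 0 + i + 1))
         (fun x => x)).getD 0)
      = (PySem.List.max?
          (dl.map (fun x => x + dl.foldl (fun c y => if x ≤ y then c + 1 else c) 0))
          (fun x => x)).getD 0 := by
  have hmap : dl.map (fun x => x + dl.foldl (fun c y => if x ≤ y then c + 1 else c) 0)
      = dl.map (fun x => x + (dl.countP (fun y => x ≤ y) : Int)) := by
    apply List.map_congr_left
    intro x _
    rw [pvFoldlCount]; ring
  rw [hmap]
  set g : Int → Int := fun x => x + (dl.countP (fun y => x ≤ y) : Int) with hg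
  set s := PySem.List.sorted dl (fun x => x) true with hs
  have hperm : s.Perm dl := PySem.List.sorted_perm dl (fun x => x) true
  by_cases hdl : dl = []
  · subst hdl
    have hnil : s = [] := by rw [hs]; exact (PySem.List.sorted_eq_nil_iff _ _ _).mpr rfl
    rw [if_pos hnil]
    have hnone : PySem.List.max? ([] : List Int) (fun x : Int => x) = none :=
      (PySem.List.max?_eq_none_iff _ _).mpr rfl
    simp [hnone]
  · have hsne : s ≠ [] := by
      rw [hs]
      intro hnil
      exact hdl ((PySem.List.sorted_eq_nil_iff _ _ _).mp hnil)
    rw [if_neg hsne]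
    set L := (PySem.List.pyRange 0 (s.length : Int) 1).map
        (fun i => PySem.List.pyGetD s i 0 + i + 1) with hL
    have hLlen : L.length = s.length := by
      rw [hL, List.length_map, PySem.List.length_pyRange_one]
      simp
    have hLne : L ≠ [] := by
      intro hnil
      apply hsne
      have h0 : s.length = 0 := by rw [← hLlen, hnil]; rfl
      exact List.eq_nil_of_length_eq_zero h0
    have hMne : dl.map g ≠ [] := by
      simpa using hdl
    obtain ⟨m, hm⟩ : ∃ m, PySem.List.max? L (fun x => x) = some m := by
      cases hmax : PySem.List.max? L (fun x => x) with
      | none => exact absurd ((PySem.List.max?_eq_none_iff _ _).mp hmax) hLne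
      | some m => exact ⟨m, rfl⟩
    obtain ⟨m', hm'⟩ : ∃ m', PySem.List.max? (dl.map g) (fun x => x) = some m' := by
      cases hmax : PySem.List.max? (dl.map g) (fun x => x) with
      | none => exact absurd ((PySem.List.max?_eq_none_iff _ _).mp hmax) hMne
      | some m' => exact ⟨m', rfl⟩
    rw [hm, hm', Option.getD_some, Option.getD_some]
    have hmmem : m ∈ L := PySem.List.max?_mem hm
    have hmub : ∀ y ∈ L, y ≤ m := PySem.List.max?_isMax hm
    have hm'mem : m' ∈ dl.map g := PySem.List.max?_mem hm'
    have hm'ub : ∀ y ∈ dl.map g, y ≤ m' := PySem.List.max?_isMax hm'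
    apply le_antisymm
    · -- m ≤ m'
      obtain ⟨k, hk, rfl⟩ := (pvMemL s _).mp hmmem
      have hmem : s[k] ∈ dl := hperm.mem_iff.mp (List.getElem_mem hk)
      have hcntk : k + 1 ≤ dl.countP (fun y => s[k] ≤ y) := pvCntGe dl k hk
      have := hm'ub (g s[k]) (List.mem_map_of_mem hmem)
      simp only [hg] at this
      omega
    · -- m' ≤ m
      obtain ⟨x, hx, rfl⟩ := List.mem_map.mp hm'mem
      obtain ⟨hc1, hcn, hxs⟩ := pvPosOfCnt dl x hx
      have hcn' : dl.countP (fun y => x ≤ y) ≤ s.length := hcn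
      have hxs' : ∀ h : dl.countP (fun y => x ≤ y) - 1 < s.length,
          x ≤ s[dl.countP (fun y => x ≤ y) - 1] := hxs
      set c := dl.countP (fun y => x ≤ y) with hc
      have hidx : c - 1 < s.length := by omega
      have hxle := hxs' hidx
      have hLmem : s[c - 1] + (c - 1 : Nat) + 1 ∈ L :=
        (pvMemL s _).mpr ⟨c - 1, hidx, rfl⟩
      have := hmub _ hLmem
      simp only [hg]
      have hcast : ((c - 1 : Nat) : Int) = (c : Int) - 1 := by omega
      omega

-- B's value is always nonnegative
theorem pvDfsBNonneg (fuel : Nat) (N : Int) (Adj : List (Int × List Int)) (v p : Int) :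
    0 ≤ dfsB fuel N Adj v p := by
  induction fuel generalizing v p with
  | zero => simp [dfsB]
  | succ f ih =>
    rw [dfsB]
    cases pvLook Adj v with
    | none => simp
    | some ns =>
      simp only
      set dl := (ns.filter (fun u => u != p)).map (fun u => dfsB f N Adj u v) with hdl
      cases hmax : PySem.List.max?
          (dl.map (fun x => x + dl.foldl (fun c y => if x ≤ y then c + 1 else c) 0))
          (fun x => x) with
      | none => simp
      | some m =>
        rw [Option.getD_some]
        have hmem := PySem.List.max?_mem hmax
        obtain ⟨x, hx, rfl⟩ := List.mem_map.mp hmem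
        obtain ⟨u, hu, rfl⟩ := List.mem_map.mp hx
        have hx0 : 0 ≤ dfsB f N Adj u v := ih u v
        rw [pvFoldlCount]
        omega

-- A's append loop produces the same child list as B's comprehension
theorem pvKidsEq (fuel : Nat) (N : Int) (Adj : List (Int × List Int)) (v p : Int)
    (hAB : ∀ u, dfsA fuel N Adj u v = dfsB fuel N Adj u v) :
    ∀ (ns : List Int) (acc : List Int),
      dfsAKids fuel N Adj ns v p acc
        = acc ++ (ns.filter (fun u => u != p)).map (fun u => dfsB fuel N Adj u v) := by
  intro ns
  induction ns with
  | nil => intro acc; rw [dfsAKids]; simp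
  | cons u t ih =>
    intro acc
    rw [dfsAKids]
    by_cases hu : u == p
    · rw [if_pos hu, ih]
      have : (u != p) = false := by simpa using hu
      simp [this]
    · rw [if_neg hu, ih, hAB u]
      have : (u != p) = true := by simpa using hu
      simp [this]

-- the two ports agree for every fuel
theorem pvAgree (fuel : Nat) (N : Int) (Adj : List (Int × List Int)) (v p : Int) :
    dfsA fuel N Adj v p = dfsB fuel N Adj v p := by
  induction fuel generalizing v p with
  | zero => rw [dfsA, dfsB]
  | succ f ih =>
    rw [dfsA, dfsB]
    cases pvLook Adj v with
    | none => rfl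
    | some ns =>
      simp only
      rw [pvKidsEq f N Adj v p (fun u => ih u v) ns []]
      simp only [List.nil_append]
      exact pvCombine _ (by
        intro x hx
        obtain ⟨u, hu, rfl⟩ := List.mem_map.mp hx
        exact pvDfsBNonneg f N Adj u v)

-- ===== VERDICT (by name: the statement is the Claim_ definition above) =====
theorem dfs_spec : Claim_equal_dfs := by
  intro N Adj v p _ _
  unfold Spec_dfs dfs dfs_alt
  exact pvAgree (pvFuel Adj) N Adj v p
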